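-- pv_equiv track=rewrite | github.com/FischermanCH/A.R.I.A. | aria/core/pipeline.py | _format_held_packages_summary
-- ===== SOURCE A (Python) =====
-- def _format_held_packages_summary(
--     held_by_connection: dict[str, list[str]],
--     connection_targets: dict[str, str],
-- ) -> str:
--     if not held_by_connection:
--         return ""
--     lines = [
--         "Hinweis: Zurückgehaltene Pakete erkannt:",
--     ]
--     merged: list[str] = []
--     seen: set[str] = set()
--     for conn_ref in sorted(held_by_connection.keys()):
--         pkgs = held_by_connection.get(conn_ref, [])
--         if not pkgs:
--             continue
--         target = connection_targets.get(conn_ref, "").strip()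
--         place = f"{conn_ref} ({target})" if target else conn_ref
--         lines.append(f"- {place}: {', '.join(pkgs)}")
--         for pkg in pkgs:
--             if pkg not in seen:
--                 seen.add(pkg)
--                 merged.append(pkg)
--     if merged:
--         lines.append("")
--         lines.append("Safe-Fix (manuell bestätigen):")
--         lines.append("sudo apt install --only-upgrade " + " ".join(merged))
--     return "\n".join(lines)
-- ===== SOURCE B (Python) =====
-- def _dedup(xs):
--     # first-occurrence dedup by divide and conquer: dedup each half, then keep
--     # of the right half only what the left half does not already contain
--     if len(xs) <= 1:
--         return list(xs)
--     mid = len(xs) // 2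
--     left = _dedup(xs[:mid])
--     right = _dedup(xs[mid:])
--     ls = set(left)
--     return left + [p for p in right if p not in ls]
--
--
-- def _format_held_packages_summary(
--     held_by_connection: dict[str, list[str]],
--     connection_targets: dict[str, str],
-- ) -> str:
--     if not held_by_connection:
--         return ""
--     keys = sorted(held_by_connection)
--     lines = ["Hinweis: Zurückgehaltene Pakete erkannt:"]
--     for conn_ref in keys:
--         pkgs = held_by_connection.get(conn_ref, [])
--         if pkgs:
--             target = connection_targets.get(conn_ref, "").strip()
--             place = f"{conn_ref} ({target})" if target else conn_ref
--             lines.append(f"- {place}: {', '.join(pkgs)}")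
--     merged = _dedup([pkg for conn_ref in keys
--                      for pkg in held_by_connection.get(conn_ref, [])])
--     if merged:
--         lines += ["", "Safe-Fix (manuell bestätigen):",
--                   "sudo apt install --only-upgrade " + " ".join(merged)]
--     return "\n".join(lines)
-- ===== Notes on version B (the rewrite author's own statement) =====
-- stated objective: alternative
-- what changed: A fuses everything into one loop threading (lines, merged, seen-set); B stages it into separate passes and replaces the running seen-set dedup by a divide-and-conquer dedup that dedups each half recursively and merges by filtering the right half against the left.
import Mathlib
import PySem

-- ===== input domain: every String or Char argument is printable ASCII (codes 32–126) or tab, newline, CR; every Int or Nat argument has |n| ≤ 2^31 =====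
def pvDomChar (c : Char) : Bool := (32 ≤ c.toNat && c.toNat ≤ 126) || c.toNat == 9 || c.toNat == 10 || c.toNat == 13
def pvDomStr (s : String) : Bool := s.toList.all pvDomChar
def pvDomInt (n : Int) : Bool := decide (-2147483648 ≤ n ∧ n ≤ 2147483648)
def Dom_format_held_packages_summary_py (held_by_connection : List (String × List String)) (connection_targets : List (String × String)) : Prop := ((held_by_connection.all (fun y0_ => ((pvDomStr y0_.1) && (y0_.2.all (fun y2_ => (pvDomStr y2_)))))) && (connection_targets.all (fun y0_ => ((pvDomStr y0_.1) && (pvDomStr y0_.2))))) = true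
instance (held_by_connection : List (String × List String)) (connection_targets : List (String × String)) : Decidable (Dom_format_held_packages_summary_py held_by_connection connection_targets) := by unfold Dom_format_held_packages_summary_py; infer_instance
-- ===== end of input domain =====

-- B restructures the formatter: instead of A's single fused loop threading
-- (lines, merged, seen-set), B stages separate passes and computes the deduplicated
-- package list by a divide-and-conquer dedup (dedup each half, filter the right half
-- against the left) — an alternative decomposition, not claimed faster.

-- ===== PORT A =====
-- dict.get(k, dflt) on an association list: first match.
def pvGetD {α : Type} (d : List (String × α)) (k : String) (dflt : α) : α :=
  match d.find? (fun p => p.1 == k) with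
  | some p => p.2
  | none => dflt

-- the `- place: pkgs` line both Pythons format with the same expression
def pvLineFor (connection_targets : List (String × String)) (conn_ref : String) (pkgs : List String) : String :=
  let target := PySem.Str.strip (pvGetD connection_targets conn_ref "")
  let place := if target ≠ "" then conn_ref ++ " (" ++ target ++ ")" else conn_ref
  "- " ++ place ++ ": " ++ PySem.Str.join ", " pkgs

-- body of A's loop: state = (lines, merged, seen)
def paStep (held_by_connection : List (String × List String)) (connection_targets : List (String × String))
    (st : List String × List String × PySem.Set String) (conn_ref : String) :
    List String × List String × PySem.Set String :=
  let pkgs := pvGetD held_by_connection conn_ref []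
  if pkgs = [] then st
  else
    let ms := pkgs.foldl
      (fun (ms : List String × PySem.Set String) pkg =>
        if PySem.Set.contains ms.2 pkg then ms
        else (ms.1 ++ [pkg], PySem.Set.add ms.2 pkg))
      (st.2.1, st.2.2)
    (st.1 ++ [pvLineFor connection_targets conn_ref pkgs], ms.1, ms.2)

def format_held_packages_summary_py (held_by_connection : List (String × List String)) (connection_targets : List (String × String)) : String :=
  if held_by_connection.isEmpty then ""
  else
    let st := (PySem.List.sorted (held_by_connection.map Prod.fst) (fun k => k) false).foldl
      (paStep held_by_connection connection_targets)
      (["Hinweis: Zurückgehaltene Pakete erkannt:"], [], PySem.Set.empty)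
    let lines := if st.2.1 ≠ [] then
        st.1 ++ ["", "Safe-Fix (manuell bestätigen):",
                 "sudo apt install --only-upgrade " ++ PySem.Str.join " " st.2.1]
      else st.1
    PySem.Str.join "\n" lines

-- ===== PORT B =====
-- B's _dedup: first-occurrence dedup by divide and conquer
def pbDedup (xs : List String) : List String :=
  if xs.length ≤ 1 then xs
  else
    let mid := xs.length / 2
    let left := pbDedup (xs.take mid)
    let right := pbDedup (xs.drop mid)
    let ls := PySem.Set.ofList left
    left ++ right.filter (fun p => !PySem.Set.contains ls p)
termination_by xs.length
decreasing_by
  · simp only [List.length_take]; omega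
  · simp only [List.length_drop]; omega

-- body of B's lines-only loop
def pbStep (held_by_connection : List (String × List String)) (connection_targets : List (String × String))
    (lines : List String) (conn_ref : String) : List String :=
  let pkgs := pvGetD held_by_connection conn_ref []
  if pkgs ≠ [] then lines ++ [pvLineFor connection_targets conn_ref pkgs]
  else lines

def format_held_packages_summary_py_alt (held_by_connection : List (String × List String)) (connection_targets : List (String × String)) : String :=
  if held_by_connection.isEmpty then ""
  else
    let keys := PySem.List.sorted (held_by_connection.map Prod.fst) (fun k => k) false
    let lines := keys.foldl (pbStep held_by_connection connection_targets)
      ["Hinweis: Zurückgehaltene Pakete erkannt:"]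
    let merged := pbDedup (keys.flatMap (fun c => pvGetD held_by_connection c []))
    let lines := if merged ≠ [] then
        lines ++ ["", "Safe-Fix (manuell bestätigen):",
                  "sudo apt install --only-upgrade " ++ PySem.Str.join " " merged]
      else lines
    PySem.Str.join "\n" lines

-- ===== PRECONDITION & SPEC =====
def Spec_format_held_packages_summary_py (held_by_connection : List (String × List String)) (connection_targets : List (String × String)) (out : String) : Prop := out = format_held_packages_summary_py_alt held_by_connection connection_targets
instance (held_by_connection : List (String × List String)) (connection_targets : List (String × String)) (out : String) : Decidable (Spec_format_held_packages_summary_py held_by_connection connection_targets out) := by unfold Spec_format_held_packages_summary_py; infer_instance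

-- ===== CLAIM (what is proved, stated in full; the proofs are below) =====
def Claim_equal_format_held_packages_summary_py : Prop := ∀ (held_by_connection : List (String × List String)) (connection_targets : List (String × String)), Dom_format_held_packages_summary_py held_by_connection connection_targets → Spec_format_held_packages_summary_py held_by_connection connection_targets (format_held_packages_summary_py held_by_connection connection_targets)

-- ===== LEMMAS AND PROOFS =====

-- proof-side helper: first-occurrence dedup as a one-sided recursion
def pvUniq : List String → List String
  | [] => []
  | x :: xs => x :: pvUniq (xs.filter (fun y => y != x))
termination_by l => l.length
decreasing_by
  simp only [List.length_unattach]
  exact Nat.lt_succ_of_le (le_trans (List.length_filter_le _ _) (le_of_eq List.length_attach))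

lemma pvUniq_nil : pvUniq [] = [] := by rw [pvUniq.eq_def]

lemma pvUniq_cons (x : String) (xs : List String) :
    pvUniq (x :: xs) = x :: pvUniq (xs.filter (fun y => y != x)) := by rw [pvUniq.eq_def]
lemma set_update_eq (s : PySem.Set String) (xs : List String) :
    PySem.Set.update s xs = s ++ pvUniq (xs.filter (fun x => !decide (x ∈ s))) := by
  induction xs generalizing s with
  | nil => simp [PySem.Set.update, pvUniq_nil]
  | cons x xs ih =>
    simp only [PySem.Set.update, List.foldl_cons] at *
    by_cases hx : x ∈ s
    · have hadd : PySem.Set.add s x = s := by simp [PySem.Set.add, hx]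
      rw [hadd, ih, List.filter_cons]
      simp [hx]
    · have hadd : PySem.Set.add s x = s ++ [x] := by simp [PySem.Set.add, hx]
      rw [hadd, ih, List.filter_cons]
      simp only [hx, decide_false, Bool.not_false, if_true, List.append_assoc]
      congr 1
      rw [pvUniq_cons, List.filter_filter]
      simp only [List.cons_append, List.nil_append, List.cons.injEq, true_and]
      congr 1
      apply List.filter_congr
      intro y _
      by_cases hyx : y = x
      · subst hyx; simp
      · simp [hyx, bne]

lemma pvUniq_eq_ofList (xs : List String) : pvUniq xs = PySem.Set.ofList xs := by
  have h := set_update_eq ([] : PySem.Set String) xs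
  simp only [List.not_mem_nil, decide_false, Bool.not_false, List.filter_true,
    List.nil_append] at h
  rw [PySem.Set.ofList_eq_foldl, ← h]
  rfl

lemma mem_pvUniq (xs : List String) (y : String) : y ∈ pvUniq xs ↔ y ∈ xs := by
  rw [pvUniq_eq_ofList]; exact PySem.Set.mem_ofList xs y

lemma pvUniq_filter : ∀ (n : Nat) (p : String → Bool) (l : List String), l.length ≤ n →
    pvUniq (l.filter p) = (pvUniq l).filter p := by
  intro n
  induction n with
  | zero =>
      intro p l hl
      have h0 : l = [] := List.eq_nil_of_length_eq_zero (Nat.le_zero.mp hl)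
      simp [h0, pvUniq_nil]
  | succ n ih =>
      intro p l hl
      match l with
      | [] => simp [pvUniq_nil]
      | x :: xs =>
        have hxs : xs.length ≤ n := Nat.lt_succ_iff.mp hl
        have hfle : ∀ q : String → Bool, (xs.filter q).length ≤ n :=
          fun q => le_trans (List.length_filter_le _ _) hxs
        by_cases hp : p x
        · simp only [List.filter_cons, hp, if_true]
          rw [pvUniq_cons, pvUniq_cons, List.filter_filter]
          simp only [List.filter_cons, hp]
          have hcomm : xs.filter (fun a => (a != x) && p a)
              = (xs.filter (fun y => y != x)).filter p := by
            rw [List.filter_filter]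
            apply List.filter_congr
            intro y _
            exact Bool.and_comm _ _
          rw [hcomm, ih _ _ (hfle _)]
          simp
        · have hp' : p x = false := by simpa using hp
          have hstep : (x :: xs).filter p = xs.filter p := by simp [hp']
          rw [hstep, ih p xs hxs, pvUniq_cons]
          have hstep2 : (x :: pvUniq (xs.filter (fun y => y != x))).filter p
              = (pvUniq (xs.filter (fun y => y != x))).filter p := by simp [hp']
          rw [hstep2, ih (fun y => y != x) xs hxs, List.filter_filter]
          apply List.filter_congr
          intro y _
          by_cases hyx : y = x
          · subst hyx; simp [hp']
          · simp [bne, hyx]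

-- uniq of an append: uniq the head block, then filter it out of the tail's uniq
lemma pvUniq_append (xs ys : List String) :
    pvUniq (xs ++ ys) = pvUniq xs ++ (pvUniq ys).filter (fun y => !decide (y ∈ xs)) := by
  have h1 : pvUniq (xs ++ ys) = PySem.Set.update (pvUniq xs) ys := by
    rw [pvUniq_eq_ofList, pvUniq_eq_ofList, PySem.Set.ofList_eq_foldl,
      PySem.Set.ofList_eq_foldl]
    simp [PySem.Set.update, List.foldl_append]
  rw [h1, set_update_eq]
  congr 1
  calc pvUniq (ys.filter (fun y => !decide (y ∈ pvUniq xs)))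
      = pvUniq (ys.filter (fun y => !decide (y ∈ xs))) := by
        congr 1
        apply List.filter_congr
        intro y _
        simp [mem_pvUniq]
    _ = (pvUniq ys).filter (fun y => !decide (y ∈ xs)) :=
        pvUniq_filter ys.length _ ys (le_refl _)

-- B's divide-and-conquer dedup computes the first-occurrence dedup
lemma pbDedup_eq : ∀ (n : Nat) (xs : List String), xs.length ≤ n → pbDedup xs = pvUniq xs := by
  intro n
  induction n with
  | zero =>
      intro xs hl
      have h0 : xs = [] := List.eq_nil_of_length_eq_zero (Nat.le_zero.mp hl)
      subst h0
      rw [pbDedup, pvUniq_nil]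
      simp
  | succ n ih =>
      intro xs hl
      by_cases hs : xs.length ≤ 1
      · match xs with
        | [] => rw [pbDedup, pvUniq_nil]; simp
        | [x] => rw [pbDedup, pvUniq_cons]; simp [pvUniq_nil]
        | x :: y :: t => simp at hs
      · rw [pbDedup]
        simp only [hs, if_false]
        have hlen : 2 ≤ xs.length := by omega
        have hmid : xs.length / 2 < xs.length := by omega
        have h1 : (xs.take (xs.length / 2)).length ≤ n := by
          simp only [List.length_take]; omega
        have h2 : (xs.drop (xs.length / 2)).length ≤ n := by
          simp only [List.length_drop]; omega
        rw [ih _ h1, ih _ h2]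
        have hmem : ∀ p, (!PySem.Set.contains
            (PySem.Set.ofList (pvUniq (xs.take (xs.length / 2)))) p)
            = !decide (p ∈ xs.take (xs.length / 2)) := by
          intro p
          have : PySem.Set.contains (PySem.Set.ofList (pvUniq (xs.take (xs.length / 2)))) p
              = decide (p ∈ xs.take (xs.length / 2)) := by
            simp only [PySem.Set.contains]
            by_cases hp : p ∈ xs.take (xs.length / 2)
            · simp [hp, PySem.Set.mem_ofList, mem_pvUniq]
            · have : p ∉ PySem.Set.ofList (pvUniq (xs.take (xs.length / 2))) := by
                intro hc
                exact hp ((mem_pvUniq _ _).mp ((PySem.Set.mem_ofList _ _).mp hc))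
              simp [hp, this]
          rw [this]
        have hfl : (pvUniq (xs.drop (xs.length / 2))).filter
              (fun p => !PySem.Set.contains
                (PySem.Set.ofList (pvUniq (xs.take (xs.length / 2)))) p)
            = (pvUniq (xs.drop (xs.length / 2))).filter
              (fun p => !decide (p ∈ xs.take (xs.length / 2))) := by
          apply List.filter_congr
          intro p _
          exact hmem p
        rw [hfl, ← pvUniq_append, List.take_append_drop]

-- A's inner package loop, started with merged = seen, keeps them equal.
lemma pa_inner (pkgs : List String) (s : PySem.Set String) :
    pkgs.foldl
      (fun (ms : List String × PySem.Set String) pkg =>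
        if PySem.Set.contains ms.2 pkg then ms
        else (ms.1 ++ [pkg], PySem.Set.add ms.2 pkg))
      (s, s)
    = (PySem.Set.update s pkgs, PySem.Set.update s pkgs) := by
  induction pkgs generalizing s with
  | nil => rfl
  | cons p ps ih =>
      simp only [List.foldl_cons, PySem.Set.update] at *
      by_cases h : p ∈ s
      · have hadd : PySem.Set.add s p = s := by simp [PySem.Set.add, h]
        simpa [h, hadd] using ih s
      · have hadd : PySem.Set.add s p = s ++ [p] := by simp [PySem.Set.add, h]
        simpa [h, hadd] using ih (s ++ [p])

-- A's outer loop, started with merged = seen, equals B's lines loop paired with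
-- seen updated by the flattened package lists.
lemma pa_outer (held : List (String × List String)) (targets : List (String × String))
    (keys : List String) (ls : List String) (s : PySem.Set String) :
    keys.foldl (paStep held targets) (ls, s, s)
    = (keys.foldl (pbStep held targets) ls,
       PySem.Set.update s (keys.flatMap (fun c => pvGetD held c [])),
       PySem.Set.update s (keys.flatMap (fun c => pvGetD held c []))) := by
  induction keys generalizing ls s with
  | nil => simp [PySem.Set.update]
  | cons k ks ih =>
      simp only [List.foldl_cons, List.flatMap_cons]
      by_cases h : pvGetD held k [] = []
      · simp [paStep, pbStep, h, ih]
      · simp only [paStep, pbStep, h, if_false, ne_eq, not_false_iff, if_true]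
        rw [pa_inner, ih]
        simp [PySem.Set.update, List.foldl_append]

-- ===== VERDICT (by name: the statement is the Claim_ definition above) =====
theorem format_held_packages_summary_py_spec : Claim_equal_format_held_packages_summary_py := by
  unfold Claim_equal_format_held_packages_summary_py
  intro held targets _
  unfold Spec_format_held_packages_summary_py
  unfold format_held_packages_summary_py format_held_packages_summary_py_alt
  by_cases h : held.isEmpty
  · simp [h]
  · simp only [h, if_neg, Bool.false_eq_true, not_false_iff]
    have hout := pa_outer held targets
      (PySem.List.sorted (held.map Prod.fst) (fun k => k) false)
      ["Hinweis: Zurückgehaltene Pakete erkannt:"] PySem.Set.empty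
    simp only [show (PySem.Set.empty : PySem.Set String) = [] from rfl] at hout ⊢
    rw [hout]
    have hm : PySem.Set.update ([] : PySem.Set String)
        ((PySem.List.sorted (held.map Prod.fst) (fun k => k) false).flatMap
          (fun c => pvGetD held c []))
      = pbDedup ((PySem.List.sorted (held.map Prod.fst) (fun k => k) false).flatMap
          (fun c => pvGetD held c [])) := by
      rw [pbDedup_eq _ _ (le_refl _), pvUniq_eq_ofList, PySem.Set.ofList_eq_foldl]
      rfl
    simp [hm]
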